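-- pv_equiv track=rewrite | github.com/Daria2002/AoC2021 | src/day12.py | small_cave_check
-- ===== SOURCE A (Python) =====
-- def small_cave_check(paths):
--     count_dict = {}
--     visit_twice = False
--     for path in paths:
--         if path.isupper():
--             continue
--         if path not in count_dict:
--             count_dict[path] = 0
--         count_dict[path] += 1
--         if count_dict[path] > 1 and not visit_twice:
--             visit_twice = True
--         elif count_dict[path] > 1 and visit_twice:
--             return False
--     return True
-- ===== SOURCE B (Python) =====
-- def small_cave_check(paths):
--     small = [p for p in paths if not p.isupper()]
--     return len(small) - len(set(small)) <= 1
-- ===== Notes on version B (the rewrite author's own statement) =====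
-- stated objective: simpler
-- what changed: Replaced the flag-threaded early-return loop with a mutating count dictionary by a count-then-decide formulation: collect the small caves and return len(small) - len(set(small)) <= 1 (duplicate-visit events = length minus distinct count).
import Mathlib
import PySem

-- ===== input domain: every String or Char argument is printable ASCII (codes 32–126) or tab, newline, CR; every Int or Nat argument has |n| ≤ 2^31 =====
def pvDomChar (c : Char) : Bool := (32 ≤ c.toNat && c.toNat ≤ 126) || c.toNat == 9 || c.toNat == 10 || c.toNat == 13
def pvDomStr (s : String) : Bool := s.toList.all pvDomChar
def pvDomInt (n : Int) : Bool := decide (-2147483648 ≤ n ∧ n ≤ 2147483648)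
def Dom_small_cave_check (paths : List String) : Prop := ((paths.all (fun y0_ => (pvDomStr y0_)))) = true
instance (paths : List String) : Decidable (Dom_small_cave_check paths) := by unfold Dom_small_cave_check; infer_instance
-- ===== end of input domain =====

-- B replaces A's flag-threaded early-return loop by a count-then-decide formulation:
-- collect the small caves, then return len(small) - len(set(small)) <= 1 (simpler).

-- shared helper: Python str.isupper(), hand-ported (exact on the ASCII domain:
-- cased characters are a-z/A-Z, so isupper ↔ some uppercase letter and no lowercase letter)
def pyStrIsupper (s : String) : Bool :=
  s.toList.any PySem.Chars.isupper && !s.toList.any PySem.Chars.islower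

-- ===== PORT A =====
-- the loop of A: state is (count_dict, visit_twice); early `return False` = result false
def scgoA : List String → PySem.Dict String Int → Bool → Bool
  | [], _, _ => true
  | path :: rest, count_dict, visit_twice =>
    if pyStrIsupper path then scgoA rest count_dict visit_twice
    else
      let d1 := if count_dict.contains path then count_dict else count_dict.insert path 0
      let d2 := d1.insert path (d1.getD path 0 + 1)
      if d2.getD path 0 > 1 && !visit_twice then scgoA rest d2 true
      else if d2.getD path 0 > 1 && visit_twice then false
      else scgoA rest d2 visit_twice

def small_cave_check (paths : List String) : Bool :=
  scgoA paths PySem.Dict.empty false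

-- ===== PORT B =====
def small_cave_check_alt (paths : List String) : Bool :=
  decide (((paths.filter (fun p => !pyStrIsupper p)).length : Int)
    - ((PySem.Set.ofList (paths.filter (fun p => !pyStrIsupper p))).length : Int) ≤ 1)

-- ===== PRECONDITION & SPEC =====
def Spec_small_cave_check (paths : List String) (out : Bool) : Prop := out = small_cave_check_alt paths
instance (paths : List String) (out : Bool) : Decidable (Spec_small_cave_check paths out) := by unfold Spec_small_cave_check; infer_instance

-- ===== CLAIM (what is proved, stated in full; the proofs are below) =====
def Claim_equal_small_cave_check : Prop := ∀ (paths : List String), Dom_small_cave_check paths → Spec_small_cave_check paths (small_cave_check paths)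

-- ===== LEMMAS AND PROOFS =====

-- number of "duplicate-visit events" of A's loop, abstracted: `seen` is the set of
-- small caves already visited at least once
def dupCnt (seen : Finset String) : List String → Nat
  | [] => 0
  | p :: rest =>
    if pyStrIsupper p then dupCnt seen rest
    else (if p ∈ seen then 1 else 0) + dupCnt (insert p seen) rest

-- A's loop returns true iff (events encoded in vt) + future events ≤ 1
theorem scgoA_eq (l : List String) : ∀ (seen : Finset String) (d : PySem.Dict String Int) (vt : Bool),
    (∀ p, 0 ≤ d.getD p 0 ∧ (0 < d.getD p 0 ↔ p ∈ seen)) →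
    scgoA l d vt = decide (dupCnt seen l + (if vt then 1 else 0) ≤ 1) := by
  induction l with
  | nil => intro seen d vt _; cases vt <;> simp [scgoA, dupCnt]
  | cons path rest ih =>
    intro seen d vt hd
    by_cases hu : pyStrIsupper path = true
    · simp only [scgoA, dupCnt, hu, if_true]
      exact ih seen d vt hd
    · simp only [scgoA, dupCnt, hu, if_false, Bool.false_eq_true]
      set d1 := if d.contains path then d else d.insert path 0 with hd1
      set d2 := d1.insert path (d1.getD path 0 + 1) with hd2
      -- combined effect of the two updates: getD q 0 is unchanged by the first insert …
      have h1 : ∀ q, d1.getD q 0 = d.getD q 0 := by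
        intro q
        rw [hd1]
        by_cases hc : d.contains path = true
        · simp [hc]
        · simp only [hc, if_false, Bool.false_eq_true]
          rw [PySem.Dict.getD_insert]
          by_cases hq : q = path
          · rw [if_pos hq, hq]
            exact (PySem.Dict.getD_of_not_contains d 0 (by simpa using hc)).symm
          · rw [if_neg hq]
      -- … and is bumped by one at `path` by the second
      have h2 : ∀ q, d2.getD q 0 = if q = path then d.getD q 0 + 1 else d.getD q 0 := by
        intro q
        rw [hd2, PySem.Dict.getD_insert]
        by_cases hq : q = path
        · simp [hq, h1]
        · simp [hq, h1]
      have hd2inv : ∀ q, 0 ≤ d2.getD q 0 ∧ (0 < d2.getD q 0 ↔ q ∈ insert path seen) := by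
        intro q
        rcases hd q with ⟨hnn, hiff⟩
        rw [h2]
        by_cases hq : q = path
        · subst hq; simp; omega
        · simp [hq, hiff, Finset.mem_insert, hnn]
      have h2p : d2.getD path 0 = d.getD path 0 + 1 := by rw [h2]; simp
      rw [h2p]
      rcases hd path with ⟨hnn, hiff⟩
      by_cases hm : path ∈ seen
      · have hpos : 0 < d.getD path 0 := hiff.mpr hm
        have hb : decide (d.getD path 0 + 1 > 1) = true := decide_eq_true (by omega)
        rw [hb]
        cases vt with
        | false =>
          simp only [Bool.not_false, Bool.and_true, if_true]
          rw [ih (insert path seen) d2 true hd2inv]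
          simp only [hm, if_true]
          exact decide_eq_decide.mpr (by simp only [Bool.false_eq_true, if_false]; omega)
        | true =>
          simp [hm]
      · have hz : d.getD path 0 = 0 := by
          by_contra hne
          exact hm (hiff.mp (by omega))
        have hb : decide (d.getD path 0 + 1 > 1) = false := decide_eq_false (by omega)
        rw [hb]
        simp only [Bool.false_and, Bool.false_eq_true, if_false]
        rw [ih (insert path seen) d2 vt hd2inv]
        simp only [hm, if_false]
        exact decide_eq_decide.mpr (by omega)

-- dupCnt counts length-minus-distinct among the small caves, relative to `seen`
theorem dupCnt_card (l : List String) : ∀ (seen : Finset String),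
    dupCnt seen l + ((l.filter (fun p => !pyStrIsupper p)).toFinset ∪ seen).card
      = (l.filter (fun p => !pyStrIsupper p)).length + seen.card := by
  induction l with
  | nil => intro seen; simp [dupCnt]
  | cons p rest ih =>
    intro seen
    by_cases hu : pyStrIsupper p = true
    · simpa [dupCnt, hu] using ih seen
    · have hins : (p :: rest.filter (fun p => !pyStrIsupper p)).toFinset ∪ seen
          = (rest.filter (fun p => !pyStrIsupper p)).toFinset ∪ insert p seen := by
        ext x
        simp only [List.toFinset_cons, Finset.mem_union, Finset.mem_insert]
        tauto
      have hIH := ih (insert p seen)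
      have hpf : pyStrIsupper p = false := by simpa using hu
      simp only [dupCnt, hpf, Bool.false_eq_true, if_false, List.filter_cons, Bool.not_false,
        if_true] at *
      rw [hins]
      by_cases hm : p ∈ seen
      · rw [Finset.card_insert_of_mem hm] at hIH
        simp only [hm, if_true, List.length_cons]
        omega
      · rw [Finset.card_insert_of_notMem hm] at hIH
        simp only [hm, if_false, List.length_cons]
        omega

-- |set(xs)| = number of distinct elements
theorem ofList_length_eq_card (xs : List String) :
    (PySem.Set.ofList xs).length = xs.toFinset.card := by
  have hts : (PySem.Set.ofList xs).toFinset = xs.toFinset := by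
    ext x
    simp [PySem.Set.mem_ofList]
  rw [← hts]
  exact (List.toFinset_card_of_nodup (PySem.Set.nodup_ofList xs)).symm

-- ===== VERDICT (by name: the statement is the Claim_ definition above) =====
theorem small_cave_check_spec : Claim_equal_small_cave_check := by
  intro paths _
  unfold Spec_small_cave_check small_cave_check small_cave_check_alt
  rw [scgoA_eq paths ∅ PySem.Dict.empty false (by intro q; simp [PySem.Dict.getD_empty])]
  have h := dupCnt_card paths ∅
  simp only [Finset.union_empty, Finset.card_empty, Nat.add_zero] at h
  rw [ofList_length_eq_card]
  exact decide_eq_decide.mpr (by simp only [Bool.false_eq_true, if_false, Nat.add_zero]; omega)
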